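-- pv_equiv track=rewrite | github.com/megensel/ha_insights | ha_insights/analytics/suggestion_generator.py | _generate_time_automation_yaml
-- ===== SOURCE A (Python) =====
-- from typing import Any, Dict, List, Optional, Set, Tuple
--
-- def _generate_time_automation_yaml(entity_id: str, domain: str, triggers: List[Dict[str, Any]]) -> str:
--     """Generate YAML for a time-based automation."""
--     yaml_lines = [
--         "# Time-based automation for {}".format(entity_id),
--         "automation:",
--         "  alias: \"Scheduled control for {}\"".format(entity_id),
--         "  description: \"Automatically control {} at scheduled times\"".format(entity_id),
--         "  trigger:"
--     ]
--
--     # Add triggers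
--     for trigger in triggers:
--         yaml_lines.append("    - platform: {}".format(trigger["platform"]))
--         yaml_lines.append("      at: \"{}\"".format(trigger["at"]))
--
--     # Add action based on domain
--     yaml_lines.append("  action:")
--
--     if domain == "light":
--         yaml_lines.append("    - service: light.turn_on")
--         yaml_lines.append("      target:")
--         yaml_lines.append("        entity_id: {}".format(entity_id))
--         yaml_lines.append("      data:")
--         yaml_lines.append("        brightness_pct: 80")
--     elif domain == "switch":
--         yaml_lines.append("    - service: switch.turn_on")
--         yaml_lines.append("      target:")
--         yaml_lines.append("        entity_id: {}".format(entity_id))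
--     elif domain == "climate":
--         yaml_lines.append("    - service: climate.set_temperature")
--         yaml_lines.append("      target:")
--         yaml_lines.append("        entity_id: {}".format(entity_id))
--         yaml_lines.append("      data:")
--         yaml_lines.append("        temperature: 21")
--     elif domain == "cover":
--         yaml_lines.append("    - service: cover.open_cover")
--         yaml_lines.append("      target:")
--         yaml_lines.append("        entity_id: {}".format(entity_id))
--     else:
--         # Generic turn_on action
--         yaml_lines.append("    - service: {}.turn_on".format(domain))
--         yaml_lines.append("      target:")
--         yaml_lines.append("        entity_id: {}".format(entity_id))
--
--     return "\n".join(yaml_lines)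
-- ===== SOURCE B (Python) =====
-- from typing import Any, Dict, List, Optional, Set, Tuple
--
-- def _generate_time_automation_yaml(entity_id: str, domain: str, triggers: List[Dict[str, Any]]) -> str:
--     """Generate YAML for a time-based automation.
--
--     Built as three string segments (header, triggers, action block) concatenated
--     directly -- no list of lines, no join.  The trigger segment is produced by a
--     recursive helper; the action segment is a whole pre-assembled block per domain.
--     """
--     header = ("# Time-based automation for {e}\n"
--               "automation:\n"
--               '  alias: "Scheduled control for {e}"\n'
--               '  description: "Automatically control {e} at scheduled times"\n'
--               "  trigger:").format(e=entity_id)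
--     target = "\n      target:\n        entity_id: " + entity_id
--     action_blocks = {
--         "light": "\n  action:\n    - service: light.turn_on" + target
--                  + "\n      data:\n        brightness_pct: 80",
--         "switch": "\n  action:\n    - service: switch.turn_on" + target,
--         "climate": "\n  action:\n    - service: climate.set_temperature" + target
--                    + "\n      data:\n        temperature: 21",
--         "cover": "\n  action:\n    - service: cover.open_cover" + target,
--     }
--     action = action_blocks.get(domain,
--                                "\n  action:\n    - service: " + domain + ".turn_on" + target)
--
--     def triggers_block(ts):
--         if not ts:
--             return ""
--         t = ts[0]
--         return ('\n    - platform: {}\n      at: "{}"'.format(t["platform"], t["at"])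
--                 + triggers_block(ts[1:]))
--
--     return header + triggers_block(triggers) + action
-- ===== Notes on version B (the rewrite author's own statement) =====
-- stated objective: alternative
-- what changed: B never builds a list of lines: it concatenates three string segments directly (a header template, a trigger segment produced by a recursive helper, and a whole pre-assembled per-domain action block chosen from a dict), replacing A's append-loop + if/elif chain + '\n'.join.
import Mathlib
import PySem

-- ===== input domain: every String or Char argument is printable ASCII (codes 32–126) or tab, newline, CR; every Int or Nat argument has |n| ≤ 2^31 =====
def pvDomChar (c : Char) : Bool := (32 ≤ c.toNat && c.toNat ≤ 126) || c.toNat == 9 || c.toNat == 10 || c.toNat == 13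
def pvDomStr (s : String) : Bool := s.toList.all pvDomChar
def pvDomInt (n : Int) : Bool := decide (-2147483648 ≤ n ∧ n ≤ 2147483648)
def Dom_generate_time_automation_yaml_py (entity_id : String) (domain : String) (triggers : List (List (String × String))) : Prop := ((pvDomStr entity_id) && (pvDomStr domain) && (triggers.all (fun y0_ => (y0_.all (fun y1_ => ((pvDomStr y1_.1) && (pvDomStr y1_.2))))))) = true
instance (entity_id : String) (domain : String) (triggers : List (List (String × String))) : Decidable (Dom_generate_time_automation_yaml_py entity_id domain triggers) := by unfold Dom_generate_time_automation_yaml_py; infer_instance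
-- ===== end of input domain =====

-- B builds the result by concatenating string segments (header / recursive trigger block / whole action block) instead of A's line list + join (objective: alternative).

-- ===== PORT A =====
-- trigger["k"] on a dict given as an association list: first match; none = KeyError (excluded by Pre_)
def pvKey (t : List (String × String)) (k : String) : Option String :=
  (t.find? (fun p => p.1 == k)).map (·.2)

def generate_time_automation_yaml_py (entity_id : String) (domain : String) (triggers : List (List (String × String))) : String :=
  let yaml_lines : List String := [
    "# Time-based automation for " ++ entity_id,
    "automation:",
    "  alias: \"Scheduled control for " ++ entity_id ++ "\"",
    "  description: \"Automatically control " ++ entity_id ++ " at scheduled times\"",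
    "  trigger:"]
  let yaml_lines := triggers.foldl (fun acc trigger =>
    (acc ++ ["    - platform: " ++ (pvKey trigger "platform").getD ""]) ++
    ["      at: \"" ++ (pvKey trigger "at").getD "" ++ "\""]) yaml_lines
  let yaml_lines := yaml_lines ++ ["  action:"]
  let yaml_lines :=
    if domain == "light" then
      yaml_lines ++ ["    - service: light.turn_on", "      target:",
        "        entity_id: " ++ entity_id, "      data:", "        brightness_pct: 80"]
    else if domain == "switch" then
      yaml_lines ++ ["    - service: switch.turn_on", "      target:",
        "        entity_id: " ++ entity_id]
    else if domain == "climate" then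
      yaml_lines ++ ["    - service: climate.set_temperature", "      target:",
        "        entity_id: " ++ entity_id, "      data:", "        temperature: 21"]
    else if domain == "cover" then
      yaml_lines ++ ["    - service: cover.open_cover", "      target:",
        "        entity_id: " ++ entity_id]
    else
      yaml_lines ++ ["    - service: " ++ domain ++ ".turn_on", "      target:",
        "        entity_id: " ++ entity_id]
  PySem.Str.join "\n" yaml_lines

-- ===== PORT B =====
-- Source B's recursive triggers_block helper
def pvTriggersBlock : List (List (String × String)) → String
  | [] => ""
  | t :: ts =>
    "\n    - platform: " ++ (pvKey t "platform").getD "" ++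
    "\n      at: \"" ++ (pvKey t "at").getD "" ++ "\"" ++ pvTriggersBlock ts

def generate_time_automation_yaml_py_alt (entity_id : String) (domain : String) (triggers : List (List (String × String))) : String :=
  -- header template with entity_id interpolated (Python .format, exact)
  let header := "# Time-based automation for " ++ entity_id ++
    "\nautomation:\n  alias: \"Scheduled control for " ++ entity_id ++
    "\"\n  description: \"Automatically control " ++ entity_id ++
    " at scheduled times\"\n  trigger:"
  let target := "\n      target:\n        entity_id: " ++ entity_id
  let action_blocks : PySem.Dict String String := PySem.Dict.ofList [
    ("light", "\n  action:\n    - service: light.turn_on" ++ target ++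
      "\n      data:\n        brightness_pct: 80"),
    ("switch", "\n  action:\n    - service: switch.turn_on" ++ target),
    ("climate", "\n  action:\n    - service: climate.set_temperature" ++ target ++
      "\n      data:\n        temperature: 21"),
    ("cover", "\n  action:\n    - service: cover.open_cover" ++ target)]
  let action := (PySem.Dict.get? action_blocks domain).getD
    ("\n  action:\n    - service: " ++ domain ++ ".turn_on" ++ target)
  header ++ pvTriggersBlock triggers ++ action

-- ===== PRECONDITION & SPEC =====
-- Pre_ excludes only inputs where A raises KeyError: a trigger dict missing "platform" or "at".
def Pre_generate_time_automation_yaml_py (entity_id : String) (domain : String) (triggers : List (List (String × String))) : Prop :=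
  (triggers.all (fun t => t.any (fun p => p.1 == "platform") && t.any (fun p => p.1 == "at"))) = true
instance (entity_id : String) (domain : String) (triggers : List (List (String × String))) : Decidable (Pre_generate_time_automation_yaml_py entity_id domain triggers) := by unfold Pre_generate_time_automation_yaml_py; infer_instance

def pvWitness_generate_time_automation_yaml_py : String × String × (List (List (String × String))) :=
  ("light.kitchen", "light", [[("platform", "time"), ("at", "07:00:00")]])

def Spec_generate_time_automation_yaml_py (entity_id : String) (domain : String) (triggers : List (List (String × String))) (out : String) : Prop := out = generate_time_automation_yaml_py_alt entity_id domain triggers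
instance (entity_id : String) (domain : String) (triggers : List (List (String × String))) (out : String) : Decidable (Spec_generate_time_automation_yaml_py entity_id domain triggers out) := by unfold Spec_generate_time_automation_yaml_py; infer_instance

-- ===== CLAIM =====
def Claim_equal_generate_time_automation_yaml_py : Prop := ∀ (entity_id : String) (domain : String) (triggers : List (List (String × String))), Dom_generate_time_automation_yaml_py entity_id domain triggers → Pre_generate_time_automation_yaml_py entity_id domain triggers → Spec_generate_time_automation_yaml_py entity_id domain triggers (generate_time_automation_yaml_py entity_id domain triggers)

-- ===== LEMMAS AND PROOFS =====

-- fuse two adjacent string literals in a left-associated append chain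
theorem pvFuse {a b c : String} (h : a ++ b = c) (X : String) : X ++ a ++ b = X ++ c := by
  rw [String.append_assoc, h]

theorem pvR0 (X : String) : X ++ "\n" ++ "    - platform: " = X ++ "\n    - platform: " := pvFuse (by decide) X
theorem pvR1 (X : String) : X ++ "\n" ++ "      at: \"" = X ++ "\n      at: \"" := pvFuse (by decide) X
theorem pvR2 (X : String) : X ++ "\n" ++ "automation:" = X ++ "\nautomation:" := pvFuse (by decide) X
theorem pvR3 (X : String) : X ++ "\nautomation:" ++ "\n" = X ++ "\nautomation:\n" := pvFuse (by decide) X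
theorem pvR4 (X : String) : X ++ "\nautomation:\n" ++ "  alias: \"Scheduled control for " = X ++ "\nautomation:\n  alias: \"Scheduled control for " := pvFuse (by decide) X
theorem pvR5 (X : String) : X ++ "\"" ++ "\n" = X ++ "\"\n" := pvFuse (by decide) X
theorem pvR6 (X : String) : X ++ "\"\n" ++ "  description: \"Automatically control " = X ++ "\"\n  description: \"Automatically control " := pvFuse (by decide) X
theorem pvR7 (X : String) : X ++ " at scheduled times\"" ++ "\n" = X ++ " at scheduled times\"\n" := pvFuse (by decide) X
theorem pvR8 (X : String) : X ++ " at scheduled times\"\n" ++ "  trigger:" = X ++ " at scheduled times\"\n  trigger:" := pvFuse (by decide) X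
theorem pvR9 (X : String) : X ++ "\n" ++ "  action:" = X ++ "\n  action:" := pvFuse (by decide) X
theorem pvR10 (X : String) : X ++ "\n  action:" ++ "\n" = X ++ "\n  action:\n" := pvFuse (by decide) X
theorem pvR11 (X : String) : X ++ "\n  action:\n" ++ "    - service: light.turn_on" = X ++ "\n  action:\n    - service: light.turn_on" := pvFuse (by decide) X
theorem pvR12 (X : String) : X ++ "\n  action:\n    - service: light.turn_on" ++ "\n" = X ++ "\n  action:\n    - service: light.turn_on\n" := pvFuse (by decide) X
theorem pvR13 (X : String) : X ++ "\n  action:\n    - service: light.turn_on\n" ++ "      target:" = X ++ "\n  action:\n    - service: light.turn_on\n      target:" := pvFuse (by decide) X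
theorem pvR14 (X : String) : X ++ "\n  action:\n    - service: light.turn_on\n      target:" ++ "\n" = X ++ "\n  action:\n    - service: light.turn_on\n      target:\n" := pvFuse (by decide) X
theorem pvR15 (X : String) : X ++ "\n  action:\n    - service: light.turn_on\n      target:\n" ++ "        entity_id: " = X ++ "\n  action:\n    - service: light.turn_on\n      target:\n        entity_id: " := pvFuse (by decide) X
theorem pvR16 (X : String) : X ++ "\n" ++ "      data:" = X ++ "\n      data:" := pvFuse (by decide) X
theorem pvR17 (X : String) : X ++ "\n      data:" ++ "\n" = X ++ "\n      data:\n" := pvFuse (by decide) X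
theorem pvR18 (X : String) : X ++ "\n      data:\n" ++ "        brightness_pct: 80" = X ++ "\n      data:\n        brightness_pct: 80" := pvFuse (by decide) X
theorem pvR19 (X : String) : X ++ "\n  action:\n" ++ "    - service: switch.turn_on" = X ++ "\n  action:\n    - service: switch.turn_on" := pvFuse (by decide) X
theorem pvR20 (X : String) : X ++ "\n  action:\n    - service: switch.turn_on" ++ "\n" = X ++ "\n  action:\n    - service: switch.turn_on\n" := pvFuse (by decide) X
theorem pvR21 (X : String) : X ++ "\n  action:\n    - service: switch.turn_on\n" ++ "      target:" = X ++ "\n  action:\n    - service: switch.turn_on\n      target:" := pvFuse (by decide) X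
theorem pvR22 (X : String) : X ++ "\n  action:\n    - service: switch.turn_on\n      target:" ++ "\n" = X ++ "\n  action:\n    - service: switch.turn_on\n      target:\n" := pvFuse (by decide) X
theorem pvR23 (X : String) : X ++ "\n  action:\n    - service: switch.turn_on\n      target:\n" ++ "        entity_id: " = X ++ "\n  action:\n    - service: switch.turn_on\n      target:\n        entity_id: " := pvFuse (by decide) X
theorem pvR24 (X : String) : X ++ "\n  action:\n" ++ "    - service: climate.set_temperature" = X ++ "\n  action:\n    - service: climate.set_temperature" := pvFuse (by decide) X
theorem pvR25 (X : String) : X ++ "\n  action:\n    - service: climate.set_temperature" ++ "\n" = X ++ "\n  action:\n    - service: climate.set_temperature\n" := pvFuse (by decide) X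
theorem pvR26 (X : String) : X ++ "\n  action:\n    - service: climate.set_temperature\n" ++ "      target:" = X ++ "\n  action:\n    - service: climate.set_temperature\n      target:" := pvFuse (by decide) X
theorem pvR27 (X : String) : X ++ "\n  action:\n    - service: climate.set_temperature\n      target:" ++ "\n" = X ++ "\n  action:\n    - service: climate.set_temperature\n      target:\n" := pvFuse (by decide) X
theorem pvR28 (X : String) : X ++ "\n  action:\n    - service: climate.set_temperature\n      target:\n" ++ "        entity_id: " = X ++ "\n  action:\n    - service: climate.set_temperature\n      target:\n        entity_id: " := pvFuse (by decide) X
theorem pvR29 (X : String) : X ++ "\n      data:\n" ++ "        temperature: 21" = X ++ "\n      data:\n        temperature: 21" := pvFuse (by decide) X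
theorem pvR30 (X : String) : X ++ "\n  action:\n" ++ "    - service: cover.open_cover" = X ++ "\n  action:\n    - service: cover.open_cover" := pvFuse (by decide) X
theorem pvR31 (X : String) : X ++ "\n  action:\n    - service: cover.open_cover" ++ "\n" = X ++ "\n  action:\n    - service: cover.open_cover\n" := pvFuse (by decide) X
theorem pvR32 (X : String) : X ++ "\n  action:\n    - service: cover.open_cover\n" ++ "      target:" = X ++ "\n  action:\n    - service: cover.open_cover\n      target:" := pvFuse (by decide) X
theorem pvR33 (X : String) : X ++ "\n  action:\n    - service: cover.open_cover\n      target:" ++ "\n" = X ++ "\n  action:\n    - service: cover.open_cover\n      target:\n" := pvFuse (by decide) X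
theorem pvR34 (X : String) : X ++ "\n  action:\n    - service: cover.open_cover\n      target:\n" ++ "        entity_id: " = X ++ "\n  action:\n    - service: cover.open_cover\n      target:\n        entity_id: " := pvFuse (by decide) X
theorem pvR35 (X : String) : X ++ "\n  action:\n" ++ "    - service: " = X ++ "\n  action:\n    - service: " := pvFuse (by decide) X
theorem pvR36 (X : String) : X ++ ".turn_on" ++ "\n" = X ++ ".turn_on\n" := pvFuse (by decide) X
theorem pvR37 (X : String) : X ++ ".turn_on\n" ++ "      target:" = X ++ ".turn_on\n      target:" := pvFuse (by decide) X
theorem pvR38 (X : String) : X ++ ".turn_on\n      target:" ++ "\n" = X ++ ".turn_on\n      target:\n" := pvFuse (by decide) X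
theorem pvR39 (X : String) : X ++ ".turn_on\n      target:\n" ++ "        entity_id: " = X ++ ".turn_on\n      target:\n        entity_id: " := pvFuse (by decide) X
theorem pvR40 (X : String) : X ++ "\n  action:\n    - service: light.turn_on" ++ "\n      target:\n        entity_id: " = X ++ "\n  action:\n    - service: light.turn_on\n      target:\n        entity_id: " := pvFuse (by decide) X
theorem pvR41 (X : String) : X ++ "\n  action:\n    - service: switch.turn_on" ++ "\n      target:\n        entity_id: " = X ++ "\n  action:\n    - service: switch.turn_on\n      target:\n        entity_id: " := pvFuse (by decide) X
theorem pvR42 (X : String) : X ++ "\n  action:\n    - service: climate.set_temperature" ++ "\n      target:\n        entity_id: " = X ++ "\n  action:\n    - service: climate.set_temperature\n      target:\n        entity_id: " := pvFuse (by decide) X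
theorem pvR43 (X : String) : X ++ "\n  action:\n    - service: cover.open_cover" ++ "\n      target:\n        entity_id: " = X ++ "\n  action:\n    - service: cover.open_cover\n      target:\n        entity_id: " := pvFuse (by decide) X
theorem pvR44 (X : String) : X ++ ".turn_on" ++ "\n      target:\n        entity_id: " = X ++ ".turn_on\n      target:\n        entity_id: " := pvFuse (by decide) X

theorem pv_ofList_cons_nl (J : List Char) : String.ofList ('\n' :: J) = "\n" ++ String.ofList J := by
  apply String.toList_inj.mp; simp

theorem pv_join_cons_cons (x y : String) (ls : List String) :
    PySem.Str.join "\n" (x :: y :: ls) = x ++ "\n" ++ PySem.Str.join "\n" (y :: ls) := by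
  simp [PySem.Str.join, PySem.Chars.join_cons_cons, pv_ofList_cons_nl, String.append_assoc]

theorem pv_foldl_str_append (ls : List String) (a : String) :
    ∀ b : String, ls.foldl (fun s l => s ++ "\n" ++ l) (a ++ b)
      = a ++ ls.foldl (fun s l => s ++ "\n" ++ l) b := by
  induction ls with
  | nil => intro b; simp
  | cons l ls ih =>
    intro b
    rw [List.foldl_cons, List.foldl_cons]
    rw [show a ++ b ++ "\n" ++ l = a ++ (b ++ "\n" ++ l) from by simp [String.append_assoc]]
    exact ih (b ++ "\n" ++ l)

-- join "\n" over a nonempty line list is the left fold gluing "\n" between lines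
theorem pv_join_eq_foldl (ls : List String) : ∀ x : String,
    PySem.Str.join "\n" (x :: ls) = ls.foldl (fun s l => s ++ "\n" ++ l) x := by
  induction ls with
  | nil => intro x; simp [PySem.Str.join, PySem.Chars.join_singleton]
  | cons y ls ih =>
    intro x
    rw [pv_join_cons_cons, ih y, List.foldl_cons, pv_foldl_str_append]

-- the fold over A's trigger lines builds B's recursive trigger block
theorem pv_fold_trig (ts : List (List (String × String))) : ∀ X : String,
    (ts.flatMap (fun t => ["    - platform: " ++ (pvKey t "platform").getD "",
        "      at: \"" ++ (pvKey t "at").getD "" ++ "\""])).foldl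
      (fun s l => s ++ "\n" ++ l) X = X ++ pvTriggersBlock ts := by
  induction ts with
  | nil => intro X; simp [pvTriggersBlock]
  | cons t ts ih =>
    intro X
    simp only [List.flatMap_cons, List.cons_append, List.nil_append, List.foldl_cons]
    rw [ih]
    simp only [pvTriggersBlock, ← String.append_assoc, pvR0, pvR1]

-- A's trigger loop (two appends per step) builds the flatMap block
theorem pv_fold_eq_flatMap (f g : List (String × String) → String)
    (init : List String) (trs : List (List (String × String))) :
    trs.foldl (fun acc t => (acc ++ [f t]) ++ [g t]) init
      = init ++ trs.flatMap (fun t => [f t, g t]) := by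
  induction trs generalizing init with
  | nil => simp
  | cons t ts ih => simp [List.foldl_cons, ih, List.flatMap, List.append_assoc]

-- ===== VERDICT =====
theorem generate_time_automation_yaml_py_spec : Claim_equal_generate_time_automation_yaml_py := by
  intro e d trs _ _
  unfold Spec_generate_time_automation_yaml_py
  unfold generate_time_automation_yaml_py generate_time_automation_yaml_py_alt
  dsimp only
  rw [pv_fold_eq_flatMap]
  by_cases h1 : d = "light"
  · subst h1
    have hg : PySem.Dict.get? (PySem.Dict.ofList [("light", ("\n  action:\n    - service: light.turn_on" ++ ("\n      target:\n        entity_id: " ++ e) ++ "\n      data:\n        brightness_pct: 80" : String)), ("switch", "\n  action:\n    - service: switch.turn_on" ++ ("\n      target:\n        entity_id: " ++ e)), ("climate", "\n  action:\n    - service: climate.set_temperature" ++ ("\n      target:\n        entity_id: " ++ e) ++ "\n      data:\n        temperature: 21"), ("cover", "\n  action:\n    - service: cover.open_cover" ++ ("\n      target:\n        entity_id: " ++ e))]) "light" = some ("\n  action:\n    - service: light.turn_on" ++ ("\n      target:\n        entity_id: " ++ e) ++ "\n      data:\n        brightness_pct: 80") := by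
      simp [PySem.Dict.ofList, PySem.Dict.update, PySem.Dict.insert, PySem.Dict.empty, PySem.Dict.contains, PySem.Dict.get?]
    rw [hg]
    rw [if_pos (by decide)]
    simp only [Option.getD_some, List.cons_append, List.nil_append, List.append_assoc]
    rw [pv_join_eq_foldl]
    simp only [List.foldl_cons]
    rw [List.foldl_append, pv_fold_trig]
    simp only [List.foldl_cons, List.foldl_nil]
    simp only [← String.append_assoc, pvR0, pvR1, pvR2, pvR3, pvR4, pvR5, pvR6, pvR7, pvR8, pvR9, pvR10, pvR11, pvR12, pvR13, pvR14, pvR15, pvR16, pvR17, pvR18, pvR19, pvR20, pvR21, pvR22, pvR23, pvR24, pvR25, pvR26, pvR27, pvR28, pvR29, pvR30, pvR31, pvR32, pvR33, pvR34, pvR35, pvR36, pvR37, pvR38, pvR39, pvR40, pvR41, pvR42, pvR43, pvR44]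
  · by_cases h2 : d = "switch"
    · subst h2
      have hg : PySem.Dict.get? (PySem.Dict.ofList [("light", ("\n  action:\n    - service: light.turn_on" ++ ("\n      target:\n        entity_id: " ++ e) ++ "\n      data:\n        brightness_pct: 80" : String)), ("switch", "\n  action:\n    - service: switch.turn_on" ++ ("\n      target:\n        entity_id: " ++ e)), ("climate", "\n  action:\n    - service: climate.set_temperature" ++ ("\n      target:\n        entity_id: " ++ e) ++ "\n      data:\n        temperature: 21"), ("cover", "\n  action:\n    - service: cover.open_cover" ++ ("\n      target:\n        entity_id: " ++ e))]) "switch" = some ("\n  action:\n    - service: switch.turn_on" ++ ("\n      target:\n        entity_id: " ++ e)) := by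
        simp [PySem.Dict.ofList, PySem.Dict.update, PySem.Dict.insert, PySem.Dict.empty, PySem.Dict.contains, PySem.Dict.get?]
      rw [hg]
      rw [if_neg (by decide)]
      rw [if_pos (by decide)]
      simp only [Option.getD_some, List.cons_append, List.nil_append, List.append_assoc]
      rw [pv_join_eq_foldl]
      simp only [List.foldl_cons]
      rw [List.foldl_append, pv_fold_trig]
      simp only [List.foldl_cons, List.foldl_nil]
      simp only [← String.append_assoc, pvR0, pvR1, pvR2, pvR3, pvR4, pvR5, pvR6, pvR7, pvR8, pvR9, pvR10, pvR11, pvR12, pvR13, pvR14, pvR15, pvR16, pvR17, pvR18, pvR19, pvR20, pvR21, pvR22, pvR23, pvR24, pvR25, pvR26, pvR27, pvR28, pvR29, pvR30, pvR31, pvR32, pvR33, pvR34, pvR35, pvR36, pvR37, pvR38, pvR39, pvR40, pvR41, pvR42, pvR43, pvR44]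
    · by_cases h3 : d = "climate"
      · subst h3
        have hg : PySem.Dict.get? (PySem.Dict.ofList [("light", ("\n  action:\n    - service: light.turn_on" ++ ("\n      target:\n        entity_id: " ++ e) ++ "\n      data:\n        brightness_pct: 80" : String)), ("switch", "\n  action:\n    - service: switch.turn_on" ++ ("\n      target:\n        entity_id: " ++ e)), ("climate", "\n  action:\n    - service: climate.set_temperature" ++ ("\n      target:\n        entity_id: " ++ e) ++ "\n      data:\n        temperature: 21"), ("cover", "\n  action:\n    - service: cover.open_cover" ++ ("\n      target:\n        entity_id: " ++ e))]) "climate" = some ("\n  action:\n    - service: climate.set_temperature" ++ ("\n      target:\n        entity_id: " ++ e) ++ "\n      data:\n        temperature: 21") := by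
          simp [PySem.Dict.ofList, PySem.Dict.update, PySem.Dict.insert, PySem.Dict.empty, PySem.Dict.contains, PySem.Dict.get?]
        rw [hg]
        rw [if_neg (by decide)]
        rw [if_neg (by decide)]
        rw [if_pos (by decide)]
        simp only [Option.getD_some, List.cons_append, List.nil_append, List.append_assoc]
        rw [pv_join_eq_foldl]
        simp only [List.foldl_cons]
        rw [List.foldl_append, pv_fold_trig]
        simp only [List.foldl_cons, List.foldl_nil]
        simp only [← String.append_assoc, pvR0, pvR1, pvR2, pvR3, pvR4, pvR5, pvR6, pvR7, pvR8, pvR9, pvR10, pvR11, pvR12, pvR13, pvR14, pvR15, pvR16, pvR17, pvR18, pvR19, pvR20, pvR21, pvR22, pvR23, pvR24, pvR25, pvR26, pvR27, pvR28, pvR29, pvR30, pvR31, pvR32, pvR33, pvR34, pvR35, pvR36, pvR37, pvR38, pvR39, pvR40, pvR41, pvR42, pvR43, pvR44]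
      · by_cases h4 : d = "cover"
        · subst h4
          have hg : PySem.Dict.get? (PySem.Dict.ofList [("light", ("\n  action:\n    - service: light.turn_on" ++ ("\n      target:\n        entity_id: " ++ e) ++ "\n      data:\n        brightness_pct: 80" : String)), ("switch", "\n  action:\n    - service: switch.turn_on" ++ ("\n      target:\n        entity_id: " ++ e)), ("climate", "\n  action:\n    - service: climate.set_temperature" ++ ("\n      target:\n        entity_id: " ++ e) ++ "\n      data:\n        temperature: 21"), ("cover", "\n  action:\n    - service: cover.open_cover" ++ ("\n      target:\n        entity_id: " ++ e))]) "cover" = some ("\n  action:\n    - service: cover.open_cover" ++ ("\n      target:\n        entity_id: " ++ e)) := by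
            simp [PySem.Dict.ofList, PySem.Dict.update, PySem.Dict.insert, PySem.Dict.empty, PySem.Dict.contains, PySem.Dict.get?]
          rw [hg]
          rw [if_neg (by decide)]
          rw [if_neg (by decide)]
          rw [if_neg (by decide)]
          rw [if_pos (by decide)]
          simp only [Option.getD_some, List.cons_append, List.nil_append, List.append_assoc]
          rw [pv_join_eq_foldl]
          simp only [List.foldl_cons]
          rw [List.foldl_append, pv_fold_trig]
          simp only [List.foldl_cons, List.foldl_nil]
          simp only [← String.append_assoc, pvR0, pvR1, pvR2, pvR3, pvR4, pvR5, pvR6, pvR7, pvR8, pvR9, pvR10, pvR11, pvR12, pvR13, pvR14, pvR15, pvR16, pvR17, pvR18, pvR19, pvR20, pvR21, pvR22, pvR23, pvR24, pvR25, pvR26, pvR27, pvR28, pvR29, pvR30, pvR31, pvR32, pvR33, pvR34, pvR35, pvR36, pvR37, pvR38, pvR39, pvR40, pvR41, pvR42, pvR43, pvR44]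
        · have e1 : (d == "light") = false := beq_eq_false_iff_ne.mpr h1
          have e2 : (d == "switch") = false := beq_eq_false_iff_ne.mpr h2
          have e3 : (d == "climate") = false := beq_eq_false_iff_ne.mpr h3
          have e4 : (d == "cover") = false := beq_eq_false_iff_ne.mpr h4
          have f1 : (("light":String) == d) = false := beq_eq_false_iff_ne.mpr (Ne.symm h1)
          have f2 : (("switch":String) == d) = false := beq_eq_false_iff_ne.mpr (Ne.symm h2)
          have f3 : (("climate":String) == d) = false := beq_eq_false_iff_ne.mpr (Ne.symm h3)
          have f4 : (("cover":String) == d) = false := beq_eq_false_iff_ne.mpr (Ne.symm h4)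
          have hg : PySem.Dict.get? (PySem.Dict.ofList [("light", ("\n  action:\n    - service: light.turn_on" ++ ("\n      target:\n        entity_id: " ++ e) ++ "\n      data:\n        brightness_pct: 80" : String)), ("switch", "\n  action:\n    - service: switch.turn_on" ++ ("\n      target:\n        entity_id: " ++ e)), ("climate", "\n  action:\n    - service: climate.set_temperature" ++ ("\n      target:\n        entity_id: " ++ e) ++ "\n      data:\n        temperature: 21"), ("cover", "\n  action:\n    - service: cover.open_cover" ++ ("\n      target:\n        entity_id: " ++ e))]) d = none := by
            simp [PySem.Dict.ofList, PySem.Dict.update, PySem.Dict.insert, PySem.Dict.empty, PySem.Dict.contains, PySem.Dict.get?, f1, f2, f3, f4]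
          rw [hg]
          simp only [e1, e2, e3, e4, Bool.false_eq_true, if_false, Option.getD_none,
            List.cons_append, List.nil_append, List.append_assoc]
          rw [pv_join_eq_foldl]
          simp only [List.foldl_cons]
          rw [List.foldl_append, pv_fold_trig]
          simp only [List.foldl_cons, List.foldl_nil]
          simp only [← String.append_assoc, pvR0, pvR1, pvR2, pvR3, pvR4, pvR5, pvR6, pvR7, pvR8, pvR9, pvR10, pvR11, pvR12, pvR13, pvR14, pvR15, pvR16, pvR17, pvR18, pvR19, pvR20, pvR21, pvR22, pvR23, pvR24, pvR25, pvR26, pvR27, pvR28, pvR29, pvR30, pvR31, pvR32, pvR33, pvR34, pvR35, pvR36, pvR37, pvR38, pvR39, pvR40, pvR41, pvR42, pvR43, pvR44]
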